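-- pv_equiv track=rewrite | github.com/salvomenza/UDtoPP | svg_render.py | generate_legend
-- ===== SOURCE A (Python) =====
-- MOVE_COLORS = {
--     "sintagmatico": "#1a7a2a",
--     "testa":        "#1a7a2a",
--     "soggetto":     "#1a4fa0",
--     "verbo":        "#c0392b",
-- }
--
-- MOVE_DASH = {
--     "sintagmatico": "6 3",
--     "testa":        "3 3",
--     "soggetto":     "6 3",
--     "verbo":        "6 3",
-- }
--
-- def generate_legend(move_types_used, view_w, y_start):
--     if not move_types_used:
--         return [], 0
--     labels = {
--         "sintagmatico": "mvt sintagmatico",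
--         "testa":        "mvt di testa",
--         "soggetto":     "mvt soggetto",
--         "verbo":        "mvt testa verbo",
--     }
--     items = []
--     x, y = 30, y_start + 24
--     for mtype in sorted(move_types_used):
--         color = MOVE_COLORS.get(mtype, "#888")
--         dash = MOVE_DASH.get(mtype, "6 3")
--         label = labels.get(mtype, mtype)
--         items.append(
--             f'<line x1="{x}" y1="{y}" x2="{x+28}" y2="{y}" '
--             f'stroke="{color}" stroke-width="1" stroke-dasharray="{dash}"/>'
--             f'<text x="{x+34}" y="{y+4}" font-size="11" fill="#666" '
--             f'font-family="Georgia,serif">{label}</text>'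
--         )
--         x += 160
--         if x > view_w - 80:
--             x = 30
--             y += 18
--     return items, (y - y_start + 18)
-- ===== SOURCE B (Python) =====
-- MOVE_COLORS = {
--     "sintagmatico": "#1a7a2a",
--     "testa":        "#1a7a2a",
--     "soggetto":     "#1a4fa0",
--     "verbo":        "#c0392b",
-- }
--
-- MOVE_DASH = {
--     "sintagmatico": "6 3",
--     "testa":        "3 3",
--     "soggetto":     "6 3",
--     "verbo":        "6 3",
-- }
--
-- def generate_legend(move_types_used, view_w, y_start):
--     if not move_types_used:
--         return [], 0
--     labels = {
--         "sintagmatico": "mvt sintagmatico",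
--         "testa":        "mvt di testa",
--         "soggetto":     "mvt soggetto",
--         "verbo":        "mvt testa verbo",
--     }
--     # columns per row: smallest k >= 1 with 30 + 160*k > view_w - 80
--     per_row = max(1, (view_w - 110) // 160 + 1)
--     items = []
--     for i, mtype in enumerate(sorted(move_types_used)):
--         x = 30 + 160 * (i % per_row)
--         y = y_start + 24 + 18 * (i // per_row)
--         color = MOVE_COLORS.get(mtype, "#888")
--         dash = MOVE_DASH.get(mtype, "6 3")
--         label = labels.get(mtype, mtype)
--         items.append(
--             f'<line x1="{x}" y1="{y}" x2="{x+28}" y2="{y}" '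
--             f'stroke="{color}" stroke-width="1" stroke-dasharray="{dash}"/>'
--             f'<text x="{x+34}" y="{y+4}" font-size="11" fill="#666" '
--             f'font-family="Georgia,serif">{label}</text>'
--         )
--     return items, 42 + 18 * (len(move_types_used) // per_row)
-- ===== Notes on version B (the rewrite author's own statement) =====
-- stated objective: alternative
-- what changed: Replaces A's stateful x/y cursor with wrap-after-increment by a closed-form column count per_row computed once, indexed placement x=30+160*(i%per_row), y=y_start+24+18*(i//per_row), and a closed-form returned height 42+18*(n//per_row).
import Mathlib
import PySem

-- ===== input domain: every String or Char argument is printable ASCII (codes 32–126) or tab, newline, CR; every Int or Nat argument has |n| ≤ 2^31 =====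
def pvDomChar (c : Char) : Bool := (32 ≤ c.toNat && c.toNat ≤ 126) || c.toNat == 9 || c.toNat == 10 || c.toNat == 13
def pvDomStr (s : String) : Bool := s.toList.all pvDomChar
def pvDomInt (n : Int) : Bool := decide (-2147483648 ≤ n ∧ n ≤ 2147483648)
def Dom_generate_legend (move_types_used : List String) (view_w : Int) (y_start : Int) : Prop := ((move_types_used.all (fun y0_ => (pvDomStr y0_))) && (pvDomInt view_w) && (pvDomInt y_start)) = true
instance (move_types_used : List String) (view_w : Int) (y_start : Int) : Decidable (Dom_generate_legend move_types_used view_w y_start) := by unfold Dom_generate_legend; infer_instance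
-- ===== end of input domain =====

-- B computes per_row and the row/column of each item in closed form instead of A's
-- stateful x/y cursor (objective: alternative decomposition; same result proved equal).

-- ===== PORT A =====
def pvColors : PySem.Dict String String :=
  PySem.Dict.ofList [("sintagmatico", "#1a7a2a"), ("testa", "#1a7a2a"),
                     ("soggetto", "#1a4fa0"), ("verbo", "#c0392b")]

def pvDash : PySem.Dict String String :=
  PySem.Dict.ofList [("sintagmatico", "6 3"), ("testa", "3 3"),
                     ("soggetto", "6 3"), ("verbo", "6 3")]

def pvLabels : PySem.Dict String String :=
  PySem.Dict.ofList [("sintagmatico", "mvt sintagmatico"), ("testa", "mvt di testa"),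
                     ("soggetto", "mvt soggetto"), ("verbo", "mvt testa verbo")]

-- the f-string both Pythons build for one legend item at (x, y)
def pvLegendItem (x y : Int) (mtype : String) : String :=
  "<line x1=\"" ++ PySem.Int.toStr x ++ "\" y1=\"" ++ PySem.Int.toStr y ++
  "\" x2=\"" ++ PySem.Int.toStr (x + 28) ++ "\" y2=\"" ++ PySem.Int.toStr y ++
  "\" stroke=\"" ++ pvColors.getD mtype "#888" ++
  "\" stroke-width=\"1\" stroke-dasharray=\"" ++ pvDash.getD mtype "6 3" ++
  "\"/><text x=\"" ++ PySem.Int.toStr (x + 34) ++ "\" y=\"" ++ PySem.Int.toStr (y + 4) ++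
  "\" font-size=\"11\" fill=\"#666\" font-family=\"Georgia,serif\">" ++
  pvLabels.getD mtype mtype ++ "</text>"

def generate_legend (move_types_used : List String) (view_w : Int) (y_start : Int) : List String × Int :=
  if move_types_used = [] then ([], 0)
  else
    let res := (PySem.List.sorted move_types_used (fun s => s) false).foldl
      (fun (st : List String × Int × Int) mtype =>
        let items := st.1 ++ [pvLegendItem st.2.1 st.2.2 mtype]
        let x := st.2.1 + 160
        if x > view_w - 80 then (items, 30, st.2.2 + 18) else (items, x, st.2.2))
      ([], 30, y_start + 24)
    (res.1, res.2.2 - y_start + 18)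

-- ===== PORT B =====
def generate_legend_alt (move_types_used : List String) (view_w : Int) (y_start : Int) : List String × Int :=
  if move_types_used = [] then ([], 0)
  else
    let per_row := max 1 (PySem.Int.floordiv (view_w - 110) 160 + 1)
    let items := (PySem.List.enumerate (PySem.List.sorted move_types_used (fun s => s) false) 0).map
      (fun p => pvLegendItem (30 + 160 * PySem.Int.mod p.1 per_row)
                             (y_start + 24 + 18 * PySem.Int.floordiv p.1 per_row) p.2)
    (items, 42 + 18 * PySem.Int.floordiv (move_types_used.length : Int) per_row)

-- ===== PRECONDITION & SPEC =====
def Spec_generate_legend (move_types_used : List String) (view_w : Int) (y_start : Int) (out : List String × Int) : Prop := out = generate_legend_alt move_types_used view_w y_start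
instance (move_types_used : List String) (view_w : Int) (y_start : Int) (out : List String × Int) : Decidable (Spec_generate_legend move_types_used view_w y_start out) := by unfold Spec_generate_legend; infer_instance

-- ===== CLAIM (what is proved, stated in full; the proofs are below) =====
def Claim_equal_generate_legend : Prop := ∀ (move_types_used : List String) (view_w : Int) (y_start : Int), Dom_generate_legend move_types_used view_w y_start → Spec_generate_legend move_types_used view_w y_start (generate_legend move_types_used view_w y_start)

-- ===== LEMMAS AND PROOFS =====

-- the wrap test A performs after placing the item in column c fires exactly on the last column
lemma pv_wrap_iff (W c : Int) (h0 : 0 ≤ c) (hc : c < max 1 ((W - 110) / 160 + 1)) :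
    (30 + 160 * c + 160 > W - 80 ↔ c + 1 = max 1 ((W - 110) / 160 + 1)) := by
  omega

lemma pv_succ_divmod_wrap (P i : Int) (hP : 0 < P) (h : i % P + 1 = P) :
    (i + 1) % P = 0 ∧ (i + 1) / P = i / P + 1 := by
  have hq := Int.mul_ediv_add_emod i P
  have h1 : i + 1 = P * (i / P + 1) := by ring_nf; omega
  constructor
  · rw [h1]; exact Int.mul_emod_right P _
  · rw [h1]; exact Int.mul_ediv_cancel_left _ (by omega)

lemma pv_succ_divmod_nowrap (P i : Int) (hP : 0 < P) (h0 : 0 ≤ i % P) (hlt : i % P < P)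
    (h : i % P + 1 ≠ P) :
    (i + 1) % P = i % P + 1 ∧ (i + 1) / P = i / P := by
  have hq := Int.mul_ediv_add_emod i P
  have h1 : i + 1 = (i % P + 1) + P * (i / P) := by omega
  constructor
  · rw [h1, Int.add_mul_emod_self_left, Int.emod_eq_of_lt (by omega) (by omega)]
  · rw [h1, Int.add_mul_ediv_left _ _ (by omega : P ≠ 0),
        Int.ediv_eq_zero_of_lt (by omega) (by omega)]
    omega

-- A's cursor loop, started at absolute item index i, produces B's indexed items
lemma pv_loop (W y0 P : Int) (hP : 0 < P)
    (hwrap : ∀ c : Int, 0 ≤ c → c < P → (30 + 160 * c + 160 > W - 80 ↔ c + 1 = P)) :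
    ∀ (s : List String) (i : Int), 0 ≤ i → ∀ (items0 : List String),
      s.foldl
        (fun (st : List String × Int × Int) mtype =>
          let items := st.1 ++ [pvLegendItem st.2.1 st.2.2 mtype]
          let x := st.2.1 + 160
          if x > W - 80 then (items, 30, st.2.2 + 18) else (items, x, st.2.2))
        (items0, 30 + 160 * (i % P), y0 + 18 * (i / P))
      = (items0 ++ (PySem.List.enumerate s i).map
            (fun p => pvLegendItem (30 + 160 * (p.1 % P)) (y0 + 18 * (p.1 / P)) p.2),
         30 + 160 * ((i + s.length) % P), y0 + 18 * ((i + s.length) / P)) := by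
  intro s
  induction s with
  | nil => intro i hi items0; simp [PySem.List.enumerate_nil]
  | cons m rest ih =>
    intro i hi items0
    have hm0 : 0 ≤ i % P := Int.emod_nonneg i (by omega)
    have hmlt : i % P < P := Int.emod_lt_of_pos i hP
    rw [List.foldl_cons]
    simp only
    have hcast : (i + ((m :: rest).length : Int)) = (i + 1) + (rest.length : Int) := by
      simp [List.length_cons]; ring
    have this' := ih (i + 1) (by omega)
      (items0 ++ [pvLegendItem (30 + 160 * (i % P)) (y0 + 18 * (i / P)) m])
    by_cases hw : i % P + 1 = P
    · obtain ⟨he, hd⟩ := pv_succ_divmod_wrap P i hP hw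
      rw [if_pos (by have := (hwrap _ hm0 hmlt).mpr hw; omega)]
      rw [he, hd] at this'
      rw [show 30 + 160 * (0 : Int) = 30 from by norm_num,
          show y0 + 18 * (i / P + 1) = y0 + 18 * (i / P) + 18 from by ring] at this'
      rw [this', PySem.List.enumerate_cons, hcast]
      simp [List.append_assoc]
    · obtain ⟨he, hd⟩ := pv_succ_divmod_nowrap P i hP hm0 hmlt hw
      rw [if_neg (by have := fun h => hw ((hwrap _ hm0 hmlt).mp h); omega)]
      rw [he, hd] at this'
      rw [show 30 + 160 * (i % P + 1) = 30 + 160 * (i % P) + 160 from by ring] at this'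
      rw [this', PySem.List.enumerate_cons, hcast]
      simp [List.append_assoc]

-- ===== VERDICT (by name: the statement is the Claim_ definition above) =====
theorem generate_legend_spec : Claim_equal_generate_legend := by
  intro mts W y_start _
  unfold Spec_generate_legend generate_legend generate_legend_alt
  by_cases hmts : mts = []
  · simp [hmts]
  · rw [if_neg hmts, if_neg hmts]
    simp only
    set P : Int := max 1 ((W - 110) / 160 + 1) with hPdef
    have hP : 0 < P := by omega
    have hPf : max 1 (PySem.Int.floordiv (W - 110) 160 + 1) = P := by
      rw [PySem.Int.floordiv_eq_ediv_of_pos (by norm_num)]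
    have hlen : (((PySem.List.sorted mts (fun s => s) false).length : Int)) = (mts.length : Int) := by
      rw [PySem.List.length_sorted]
    have hloop := pv_loop W (y_start + 24) P hP (fun c h0 hc => pv_wrap_iff W c h0 hc)
      (PySem.List.sorted mts (fun s => s) false) 0 (by omega) []
    simp only [Int.zero_emod, Int.zero_ediv, mul_zero, add_zero, zero_add, List.nil_append] at hloop
    rw [hloop]
    simp only [hPf, hlen, Prod.mk.injEq]
    refine ⟨?_, ?_⟩
    · apply List.map_congr_left
      intro p hp
      rw [PySem.Int.mod_eq_emod_of_pos hP, PySem.Int.floordiv_eq_ediv_of_pos hP]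
    · rw [PySem.Int.floordiv_eq_ediv_of_pos hP]
      ring
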